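-- pv_equiv track=rewrite | github.com/IAM-B/Mawaqit_API_to_ics | app/modules/time_segmenter.py | generate_empty_slots_for_timeline
-- ===== SOURCE A (Python) =====
-- def generate_empty_slots_for_timeline(slots: list) -> list:
--     """
--     Generate empty slots between available slots for timeline display.
--
--     Args:
--         slots (list): List of available slots with start and end times
--
--     Returns:
--         list: List of empty slots with start and end times
--     """
--     if not slots or len(slots) == 0:
--         return [{"start": "00:00", "end": "23:59"}]
--
--     empty_slots = []
--
--     # Add empty slot before first slot (if not starting at 00:00)
--     if slots[0].get("start") != "00:00":
--         empty_slots.append({"start": "00:00", "end": slots[0].get("start")})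
--
--     # Add empty slots between available slots
--     for i in range(len(slots) - 1):
--         current_slot = slots[i]
--         next_slot = slots[i + 1]
--
--         if current_slot.get("end") != next_slot.get("start"):
--             empty_slots.append(
--                 {"start": current_slot.get("end"), "end": next_slot.get("start")}
--             )
--
--     # Add empty slot after last slot (if not ending at 23:59)
--     if slots[-1].get("end") != "23:59":
--         empty_slots.append({"start": slots[-1].get("end"), "end": "23:59"})
--
--     return empty_slots
-- ===== SOURCE B (Python) =====
-- def generate_empty_slots_for_timeline(slots: list) -> list:
--     """
--     Generate empty slots between available slots for timeline display,
--     by divide and conquer over a boundary-padded list: the gaps of a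
--     segment are the gaps of its left half, plus the junction gap where
--     the halves meet, plus the gaps of its right half.
--     """
--     def interior(seg):
--         # gaps between consecutive elements of seg
--         if len(seg) <= 1:
--             return []
--         mid = len(seg) // 2
--         left, right = seg[:mid], seg[mid:]
--         a, b = left[-1].get("end"), right[0].get("start")
--         junction = [] if a == b else [{"start": a, "end": b}]
--         return interior(left) + junction + interior(right)
--
--     padded = [{"end": "00:00"}] + list(slots) + [{"start": "23:59"}]
--     return interior(padded)
-- ===== Notes on version B (the rewrite author's own statement) =====
-- stated objective: alternative
-- what changed: Replaces A's three sequential cases (before-first check, indexed loop over adjacent pairs, after-last check) with a divide-and-conquer recursion on a boundary-padded list: the gaps of a segment are the gaps of its left half, the junction gap between the halves, and the gaps of its right half.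
import Mathlib
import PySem

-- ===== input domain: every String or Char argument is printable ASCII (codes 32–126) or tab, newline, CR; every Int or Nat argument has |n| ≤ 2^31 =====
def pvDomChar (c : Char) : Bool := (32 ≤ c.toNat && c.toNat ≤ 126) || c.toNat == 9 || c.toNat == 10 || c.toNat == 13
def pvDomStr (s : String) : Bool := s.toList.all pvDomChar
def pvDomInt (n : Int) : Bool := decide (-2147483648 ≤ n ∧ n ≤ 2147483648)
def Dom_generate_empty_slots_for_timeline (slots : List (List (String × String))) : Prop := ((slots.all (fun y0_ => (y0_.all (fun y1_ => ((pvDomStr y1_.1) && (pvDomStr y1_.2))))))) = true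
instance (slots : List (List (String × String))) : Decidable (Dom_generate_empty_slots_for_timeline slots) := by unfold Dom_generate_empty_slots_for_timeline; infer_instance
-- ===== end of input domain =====

-- B replaces A's three sequential cases by a divide-and-conquer recursion on a
-- boundary-padded list (objective: alternative decomposition, same results).

-- dict.get(k) on an association list: first match, none if missing (shared helper)
def dget (d : List (String × String)) (k : String) : Option String :=
  (d.find? (fun p => p.1 == k)).map (·.2)

-- ===== PORT A =====
def generate_empty_slots_for_timeline (slots : List (List (String × String))) : List (List (String × Option String)) :=
  if slots.isEmpty then
    [[("start", some "00:00"), ("end", some "23:59")]]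
  else
    let empty0 : List (List (String × Option String)) := []
    -- if slots[0].get("start") != "00:00"
    let empty1 :=
      if dget (slots.getD 0 []) "start" ≠ some "00:00" then
        empty0 ++ [[("start", some "00:00"), ("end", dget (slots.getD 0 []) "start")]]
      else empty0
    -- for i in range(len(slots) - 1)
    let empty2 :=
      (List.range (slots.length - 1)).foldl (fun acc i =>
        let c := slots.getD i []
        let n := slots.getD (i + 1) []
        if dget c "end" ≠ dget n "start" then
          acc ++ [[("start", dget c "end"), ("end", dget n "start")]]
        else acc) empty1
    -- if slots[-1].get("end") != "23:59"
    if dget (slots.getLastD []) "end" ≠ some "23:59" then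
      empty2 ++ [[("start", dget (slots.getLastD []) "end"), ("end", some "23:59")]]
    else empty2

-- ===== PORT B =====
-- interior(seg): gaps between consecutive elements of seg, by splitting at the midpoint
def interiorB (seg : List (List (String × String))) : List (List (String × Option String)) :=
  if _h : seg.length ≤ 1 then []
  else
    let mid := seg.length / 2
    let left := seg.take mid
    let right := seg.drop mid
    let a := dget (left.getLastD []) "end"
    let b := dget (right.getD 0 []) "start"
    let junction : List (List (String × Option String)) :=
      if a = b then [] else [[("start", a), ("end", b)]]
    interiorB left ++ junction ++ interiorB right
termination_by seg.length
decreasing_by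
  · simp only [List.length_take]
    omega
  · simp only [List.length_drop]
    omega

def generate_empty_slots_for_timeline_alt (slots : List (List (String × String))) : List (List (String × Option String)) :=
  interiorB ([[("end", "00:00")]] ++ slots ++ [[("start", "23:59")]])

-- ===== PRECONDITION & SPEC =====
def Spec_generate_empty_slots_for_timeline (slots : List (List (String × String))) (out : List (List (String × Option String))) : Prop := out = generate_empty_slots_for_timeline_alt slots
instance (slots : List (List (String × String))) (out : List (List (String × Option String))) : Decidable (Spec_generate_empty_slots_for_timeline slots out) := by unfold Spec_generate_empty_slots_for_timeline; infer_instance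

-- ===== CLAIM (what is proved, stated in full; the proofs are below) =====
def Claim_equal_generate_empty_slots_for_timeline : Prop := ∀ (slots : List (List (String × String))), Dom_generate_empty_slots_for_timeline slots → Spec_generate_empty_slots_for_timeline slots (generate_empty_slots_for_timeline slots)

-- ===== LEMMAS AND PROOFS =====

-- the gap (if any) between a slot ending at `dget x "end"` and one starting at `dget y "start"`
def gp (x y : List (String × String)) : List (List (String × Option String)) :=
  if dget x "end" = dget y "start" then []
  else [[("start", dget x "end"), ("end", dget y "start")]]

-- consecutive pairs of a concatenation of two nonempty lists
theorem zip_tail_append {α : Type} (d : α) (l1 l2 : List α) (h1 : l1 ≠ []) (h2 : l2 ≠ []) :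
    (l1 ++ l2).zip (l1 ++ l2).tail =
      l1.zip l1.tail ++ [(l1.getLastD d, l2.getD 0 d)] ++ l2.zip l2.tail := by
  induction l1 with
  | nil => exact absurd rfl h1
  | cons x t ih =>
    cases t with
    | nil =>
      cases l2 with
      | nil => exact absurd rfl h2
      | cons y t2 => simp [List.zip]
    | cons y t' =>
      have := ih (by simp)
      simp only [List.cons_append, List.tail_cons, List.zip_cons_cons] at *
      simp [this, List.getLastD]

-- interiorB computes exactly the gaps of the consecutive pairs
theorem interiorB_eq (seg : List (List (String × String))) :
    interiorB seg = (seg.zip seg.tail).flatMap (fun pr => gp pr.1 pr.2) := by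
  rw [interiorB]
  split
  · rename_i h
    match seg, h with
    | [], _ => simp
    | [x], _ => simp
  · rename_i h
    have h2 : 2 ≤ seg.length := by omega
    have hm1 : 1 ≤ seg.length / 2 := by omega
    have hm2 : seg.length / 2 < seg.length := by omega
    have htake : seg.take (seg.length / 2) ≠ [] := by
      simp only [ne_eq, ← List.length_eq_zero_iff, List.length_take]
      omega
    have hdrop : seg.drop (seg.length / 2) ≠ [] := by
      simp only [ne_eq, ← List.length_eq_zero_iff, List.length_drop]
      omega
    have e1 := interiorB_eq (seg.take (seg.length / 2))
    have e2 := interiorB_eq (seg.drop (seg.length / 2))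
    dsimp only
    rw [e1, e2]
    conv_rhs => rw [← List.take_append_drop (seg.length / 2) seg]
    rw [zip_tail_append ([] : List (String × String)) _ _ htake hdrop]
    simp [gp, List.flatMap_append]
termination_by seg.length
decreasing_by
  · simp only [List.length_take]; omega
  · simp only [List.length_drop]; omega

-- consecutive pairs as an index map
theorem zip_tail_eq_range_map {α : Type} (d : α) (l : List α) :
    l.zip l.tail = (List.range (l.length - 1)).map (fun i => (l.getD i d, l.getD (i + 1) d)) := by
  induction l with
  | nil => simp
  | cons x t ih =>
    cases t with
    | nil => simp
    | cons y t' =>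
      simp only [List.tail_cons, List.zip_cons_cons]
      simp only [List.tail_cons] at ih
      rw [ih]
      simp [List.range_succ_eq_map, List.map_map, Function.comp_def]

-- consecutive pairs of a padded list p0 :: x :: (t ++ [p1])
theorem pad_zip {α : Type} (d x p0 p1 : α) (t : List α) :
    (p0 :: x :: (t ++ [p1])).zip (p0 :: x :: (t ++ [p1])).tail =
      (p0, x) :: ((x :: t).zip t ++ [((x :: t).getLastD d, p1)]) := by
  have h := zip_tail_append d (x :: t) [p1] (by simp) (by simp)
  simp only [List.cons_append, List.tail_cons, List.zip_cons_cons, List.getD_cons_zero] at h ⊢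
  simp [h]

-- filtered map = flatMap of the if-form
theorem filter_map_eq_flatMap {α β : Type} (l : List α) (p : α → Prop) [DecidablePred p]
    (f : α → β) :
    (l.filter (fun x => decide (p x))).map f =
      l.flatMap (fun x => if p x then [f x] else []) := by
  induction l with
  | nil => rfl
  | cons x t ih =>
    by_cases h : p x <;> simp [h, ih]

-- ===== VERDICT (by name: the statement is the Claim_ definition above) =====
theorem generate_empty_slots_for_timeline_spec : Claim_equal_generate_empty_slots_for_timeline := by
  intro slots _
  show generate_empty_slots_for_timeline slots = generate_empty_slots_for_timeline_alt slots
  unfold generate_empty_slots_for_timeline_alt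
  rw [interiorB_eq]
  cases slots with
  | nil => decide
  | cons s rest =>
    unfold generate_empty_slots_for_timeline
    simp only [List.isEmpty_cons, Bool.false_eq_true, if_false]
    rw [PySem.List.foldl_append_ite
        (p := fun i => dget ((s :: rest).getD i []) "end" ≠ dget ((s :: rest).getD (i + 1) []) "start")
        (f := fun i => [("start", dget ((s :: rest).getD i []) "end"), ("end", dget ((s :: rest).getD (i + 1) []) "start")])]
    simp only [List.append_assoc, List.cons_append, List.nil_append]
    rw [pad_zip ([] : List (String × String)) s [("end", "00:00")] [("start", "23:59")] rest]
    simp only [List.flatMap_cons, List.flatMap_append, List.flatMap_nil]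
    have hr := zip_tail_eq_range_map ([] : List (String × String)) (s :: rest)
    simp only [List.tail_cons] at hr
    rw [hr]
    rw [List.flatMap, List.map_map]
    rw [filter_map_eq_flatMap
        (p := fun i => dget ((s :: rest).getD i []) "end" ≠ dget ((s :: rest).getD (i + 1) []) "start")
        (f := fun i => [("start", dget ((s :: rest).getD i []) "end"), ("end", dget ((s :: rest).getD (i + 1) []) "start")])]
    rw [List.flatMap]
    simp only [gp, Function.comp_def, List.getD_cons_zero, List.append_nil]
    have hs0 : dget [("end", "00:00")] "end" = some "00:00" := rfl
    have hsl : dget [("start", "23:59")] "start" = some "23:59" := rfl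
    rw [hs0, hsl]
    by_cases h1 : dget s "start" = some "00:00" <;>
      by_cases h2 : dget ((s :: rest).getLastD []) "end" = some "23:59" <;>
      simp_all [eq_comm]
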